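-- pv_equiv track=rewrite | github.com/OhSeongRak/Algorithm | Python/dp/인접한 비트의 개수.py | solution
-- ===== SOURCE A (Python) =====
-- def solution(N, k):
--     # dp[k][N][e]
--     # k: 인접한 비트의 개수가 k인 개수
--     # N: 비트의 길이
--     # e: 0 or 1. 로 끝나는 비트의 개수
--     dp = [[[0] * 2 for _ in range(N+1)] for _ in range(k+1)]
--
--     # dp[0][1][0]: 인접비트 0개, 비트 길이 1, 마지막 비트 = 0
--     # dp[0][1][1]: 인접비트 0개, 비트 길이 1, 마지막 비트 = 1
--     dp[0][1][0], dp[0][1][1] = 1, 1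
--
--     # 인접 비트 0개인 경우
--     # dp[0][i][0] : 마지막 비트와 상관없이 길이가 i-1인 비트에 0을 붙이면 됨
--     # dp[0][i][1] : 마지막 비트가 0인 길이가 i-1인 비트에 1을 붙이면 됨
--     for i in range(2, N+1):
--         dp[0][i][0] = dp[0][i-1][0] + dp[0][i-1][1]
--         dp[0][i][1] = dp[0][i-1][0]
--
--     # dp[r][c][0]: 인접 비트가 r개이고, 길이가 c-1인 비트에 0을 붙이면 됨
--     # dp[r][c][1]: 인접 비트가 r개, 길이가 c-1인 비트, 마지막 비트가 0인 비트에 1을 붙이기 +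
--     # 인접 비트가 r-1개, 길이가 c-1인 비트, 마지막 비트가 1인 비트에 1을 붙이기 (인접 비트가 1개 증가함)
--     for r in range(1, k+1):
--         for c in range(r+1, N+1):
--             dp[r][c][0] = dp[r][c-1][0] + dp[r][c-1][1]
--             dp[r][c][1] = dp[r][c-1][0] + dp[r-1][c-1][1]
--
--     # 인접 비트: k, 길이: N, 마지막 비트: 0 and 1 인 비트의 개수
--     return dp[k][N][0] + dp[k][N][1]
-- ===== SOURCE B (Python) =====
-- def solution(N, k):
--     # Closed-form count: a string with k adjacent 1-pairs and r >= 1 runs of 1s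
--     # has k + r ones (split into r nonempty runs: comb(k+r-1, r-1) ways) and
--     # N-k-r zeros, whose r+1 gaps receive the r runs in comb(N-k-r+1, r) ways;
--     # k == 0 adds the all-zeros string.  The two binomials are maintained
--     # incrementally by exact integer ratio updates; terms with 2r > N-k+1
--     # vanish, so the loop stops there.
--     total = 1 if k == 0 else 0
--     c1 = 1          # comb(k+r-1, r-1)
--     c2 = N - k      # comb(N-k-r+1, r)
--     for r in range(1, (N - k + 1) // 2 + 1):
--         total += c1 * c2
--         n = N - k - r + 1
--         c1 = c1 * (k + r) // r
--         c2 = c2 * (n - r) * (n - r - 1) // (n * (r + 1))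
--     return total
-- ===== Notes on version B (the rewrite author's own statement) =====
-- stated objective: faster
-- what changed: Replaces A's (k+1)x(N+1)x2 dynamic-programming table by a closed-form combinatorial sum over r = number of runs of 1s, adding comb(k+r-1,r-1)*comb(N-k-r+1,r) (compositions of the k+r ones into r runs times placements of the runs into the zero gaps, plus 1 for the all-zeros string when k==0), with both binomials maintained by exact integer ratio updates.
import Mathlib
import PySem

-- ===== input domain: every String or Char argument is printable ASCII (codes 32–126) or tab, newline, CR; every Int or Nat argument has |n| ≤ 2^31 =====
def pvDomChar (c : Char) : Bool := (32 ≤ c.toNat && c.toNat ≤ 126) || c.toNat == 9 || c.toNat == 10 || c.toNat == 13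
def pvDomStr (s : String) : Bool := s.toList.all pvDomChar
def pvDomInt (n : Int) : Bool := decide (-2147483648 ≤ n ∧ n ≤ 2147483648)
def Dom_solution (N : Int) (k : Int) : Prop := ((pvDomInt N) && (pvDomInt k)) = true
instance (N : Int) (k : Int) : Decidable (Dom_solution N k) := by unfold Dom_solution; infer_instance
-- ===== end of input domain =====

-- B replaces A's (k+1)×(N+1)×2 DP table by a closed-form combinatorial sum over the
-- number r of runs of 1s: comb(k+r-1,r-1)·comb(N-k-r+1,r), plus 1 for the all-zeros
-- string when k = 0, with the binomials maintained incrementally (objective: faster).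

-- ===== PORT A =====
-- A's innermost [0,0] list is modelled as a pair (Int × Int); the two Python element
-- assignments to dp[r][c] read only column c-1 and earlier rows, so writing the pair in
-- one step from the pre-statement table yields the identical table.
-- Indices are always in range for inputs satisfying Pre_ (pyGetD/pySetD are exact there).
def pvGet2 (dp : List (List (Int × Int))) (r c : Int) : Int × Int :=
  PySem.List.pyGetD (PySem.List.pyGetD dp r []) c (0, 0)

def pvSet2 (dp : List (List (Int × Int))) (r c : Int) (v : Int × Int) :
    List (List (Int × Int)) :=
  PySem.List.pySetD dp r (PySem.List.pySetD (PySem.List.pyGetD dp r []) c v)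

-- body of 'for i in range(2, N+1)'
def pvBody1 (dp : List (List (Int × Int))) (i : Int) : List (List (Int × Int)) :=
  pvSet2 dp 0 i
    ((pvGet2 dp 0 (i-1)).1 + (pvGet2 dp 0 (i-1)).2, (pvGet2 dp 0 (i-1)).1)

-- body of 'for c in range(r+1, N+1)'
def pvBody2c (r : Int) (dp : List (List (Int × Int))) (c : Int) : List (List (Int × Int)) :=
  pvSet2 dp r c
    ((pvGet2 dp r (c-1)).1 + (pvGet2 dp r (c-1)).2,
     (pvGet2 dp r (c-1)).1 + (pvGet2 dp (r-1) (c-1)).2)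

-- body of 'for r in range(1, k+1)'
def pvBodyRow (N : Int) (dp : List (List (Int × Int))) (r : Int) : List (List (Int × Int)) :=
  (PySem.List.pyRange (r+1) (N+1) 1).foldl (pvBody2c r) dp

def solution (N : Int) (k : Int) : Int :=
  let dp : List (List (Int × Int)) :=
    (PySem.List.pyRange 0 (k+1) 1).map
      (fun _ => (PySem.List.pyRange 0 (N+1) 1).map (fun _ => ((0, 0) : Int × Int)))
  let dp := pvSet2 dp 0 1 (1, 1)
  let dp := (PySem.List.pyRange 2 (N+1) 1).foldl pvBody1 dp
  let dp := (PySem.List.pyRange 1 (k+1) 1).foldl (pvBodyRow N) dp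
  (pvGet2 dp k N).1 + (pvGet2 dp k N).2

-- ===== PORT B =====
-- loop body: total += c1*c2; n = N-k-r+1; c1 = c1*(k+r)//r; c2 = c2*(n-r)*(n-r-1)//(n*(r+1))
def pvBodyB (N : Int) (k : Int) (st : Int × Int × Int) (r : Int) : Int × Int × Int :=
  let n := N - k - r + 1
  (st.1 + st.2.1 * st.2.2,
   PySem.Int.floordiv (st.2.1 * (k + r)) r,
   PySem.Int.floordiv (st.2.2 * (n - r) * (n - r - 1)) (n * (r + 1)))

def solution_alt (N : Int) (k : Int) : Int :=
  ((PySem.List.pyRange 1 (PySem.Int.floordiv (N - k + 1) 2 + 1) 1).foldl (pvBodyB N k)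
    ((if k = 0 then 1 else 0), 1, N - k)).1

-- ===== PRECONDITION & SPEC =====
-- A raises IndexError when N ≤ 0 or k < 0 (dp[0][1] / dp[0] does not exist).
def Pre_solution (N : Int) (k : Int) : Prop := 1 ≤ N ∧ 0 ≤ k
instance (N : Int) (k : Int) : Decidable (Pre_solution N k) := by
  unfold Pre_solution; infer_instance

def pvWitness_solution : Int × Int := (3, 1)

def Spec_solution (N : Int) (k : Int) (out : Int) : Prop := out = solution_alt N k
instance (N : Int) (k : Int) (out : Int) : Decidable (Spec_solution N k out) := by
  unfold Spec_solution; infer_instance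

-- ===== CLAIM (what is proved, stated in full; the proofs are below) =====
def Claim_equal_solution : Prop :=
  ∀ (N : Int) (k : Int), Dom_solution N k → Pre_solution N k →
    Spec_solution N k (solution N k)

-- ===== LEMMAS AND PROOFS =====

-- the DP recurrence A computes: pvF j c = (#length-c strings with j adjacent-1 pairs
-- ending in 0, … ending in 1); pvF j 0 is a dummy (0,0)
def pvF : Nat → Nat → Int × Int
  | _, 0 => (0, 0)
  | j, 1 => if j = 0 then (1, 1) else (0, 0)
  | j, (c+2) =>
      ((pvF j (c+1)).1 + (pvF j (c+1)).2,
       (pvF j (c+1)).1 + (match j with | 0 => 0 | (j'+1) => (pvF j' (c+1)).2))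

lemma pvF_zero : ∀ (j c : Nat), c ≤ j → pvF j c = (0, 0) := by
  intro j c
  induction c generalizing j with
  | zero => intro _; rfl
  | succ c ih =>
    intro h
    match c, j with
    | 0, j =>
      have : j ≠ 0 := by omega
      simp [pvF, this]
    | (c+1), (j+1) =>
      have h1 : pvF (j+1) (c+1) = (0,0) := ih (j+1) (by omega)
      have h2 : pvF j (c+1) = (0,0) := ih j (by omega)
      simp [pvF, h1, h2]

def pvTbl (k1 n1 : Nat) (g : Nat → Nat → Int × Int) : List (List (Int × Int)) :=
  (List.range k1).map (fun r => (List.range n1).map (g r))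

lemma pvTbl_congr {k1 n1 : Nat} {g g' : Nat → Nat → Int × Int}
    (h : ∀ r < k1, ∀ c < n1, g r c = g' r c) : pvTbl k1 n1 g = pvTbl k1 n1 g' := by
  unfold pvTbl
  apply List.map_congr_left
  intro r hr
  apply List.map_congr_left
  intro c hc
  exact h r (List.mem_range.mp hr) c (List.mem_range.mp hc)

lemma pvGetD_map_range {α : Type} (n : Nat) (f : Nat → α) (i : Int)
    (h0 : 0 ≤ i) (h : i < (n : Int)) (d : α) :
    PySem.List.pyGetD ((List.range n).map f) i d = f i.toNat := by
  rw [show i = (i.toNat : Int) by omega, PySem.List.pyGetD_natCast]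
  rw [List.getD_eq_getElem?_getD]
  simp only [List.getElem?_map, List.getElem?_range (by omega : i.toNat < n)]
  simp
  congr 1
  omega

lemma pvSet_map_range {α : Type} (n : Nat) (f : Nat → α) (i : Nat) (v : α) :
    ((List.range n).map f).set i v = (List.range n).map (fun j => if j = i then v else f j) := by
  apply List.ext_getElem
  · simp
  · intro j h1 h2
    simp only [List.length_set, List.length_map, List.length_range] at h1
    rw [List.getElem_set]
    by_cases hij : i = j
    · subst hij; simp
    · rw [if_neg hij]
      simp only [List.getElem_map, List.getElem_range]
      rw [if_neg (fun hh => hij hh.symm)]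

lemma pvGet2_tbl {k1 n1 : Nat} (g : Nat → Nat → Int × Int) (r c : Int)
    (hr0 : 0 ≤ r) (hr : r < (k1 : Int)) (hc0 : 0 ≤ c) (hc : c < (n1 : Int)) :
    pvGet2 (pvTbl k1 n1 g) r c = g r.toNat c.toNat := by
  unfold pvGet2 pvTbl
  rw [pvGetD_map_range k1 _ r hr0 hr, pvGetD_map_range n1 _ c hc0 hc]

lemma pvSet2_tbl {k1 n1 : Nat} (g : Nat → Nat → Int × Int) (r c : Int) (v : Int × Int)
    (hr0 : 0 ≤ r) (hr : r < (k1 : Int)) (hc0 : 0 ≤ c) (_hc : c < (n1 : Int)) :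
    pvSet2 (pvTbl k1 n1 g) r c v =
      pvTbl k1 n1 (fun r' c' => if r' = r.toNat ∧ c' = c.toNat then v else g r' c') := by
  unfold pvSet2 pvTbl
  rw [pvGetD_map_range k1 _ r hr0 hr]
  rw [PySem.List.pySetD_of_nonneg (h := hc0), PySem.List.pySetD_of_nonneg (h := hr0)]
  rw [pvSet_map_range n1 _ c.toNat v, pvSet_map_range k1 _ r.toNat _]
  apply List.map_congr_left
  intro r' _
  by_cases hrr : r' = r.toNat
  · simp only [if_pos hrr]
    apply List.map_congr_left
    intro c' _
    by_cases hcc : c' = c.toNat <;> simp [hrr, hcc]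
  · simp only [if_neg hrr]
    apply List.map_congr_left
    intro c' _
    simp [hrr]

lemma pvInit (n k1 : Nat) :
    ((PySem.List.pyRange 0 ((k1:Int)+1) 1).map
      (fun _ => (PySem.List.pyRange 0 ((n:Int)+1) 1).map (fun _ => ((0,0) : Int × Int))))
    = pvTbl (k1+1) (n+1) (fun _ _ => (0,0)) := by
  simp [pvTbl, PySem.List.pyRange_one, Function.comp_def, List.map_const']

lemma phase1 (n k1 : Nat) (m : Nat) (h1 : 1 ≤ m) (hm : m ≤ n) :
    (PySem.List.pyRange 2 ((m:Int)+1) 1).foldl pvBody1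
      (pvTbl (k1+1) (n+1) (fun r c => if r = 0 ∧ c = 1 then (1,1) else (0,0)))
    = pvTbl (k1+1) (n+1) (fun r c => if r = 0 ∧ 1 ≤ c ∧ c ≤ m then pvF 0 c else (0,0)) := by
  induction m with
  | zero => omega
  | succ m ih =>
    by_cases hm1 : m = 0
    · subst hm1
      rw [PySem.List.pyRange_one_eq_nil (by norm_num)]
      simp only [List.foldl_nil]
      apply pvTbl_congr
      intro r _ c _
      by_cases h : r = 0 ∧ c = 1
      · obtain ⟨h1', h2'⟩ := h; subst h1'; subst h2'
        rw [if_pos (by omega), if_pos (by omega)]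
        simp [pvF]
      · rw [if_neg h, if_neg (by rintro ⟨a, b, c'⟩; exact h ⟨a, by omega⟩)]
    · have hm' : 1 ≤ m := by omega
      rw [show ((m+1 : Nat) : Int) + 1 = ((m:Int)+1) + 1 from by push_cast; ring]
      rw [PySem.List.pyRange_one_succ_right (by omega : (2:Int) ≤ (m:Int)+1)]
      rw [List.foldl_append, ih hm' (by omega)]
      simp only [List.foldl_cons, List.foldl_nil]
      unfold pvBody1
      rw [show ((m:Int)+1-1) = (m:Int) from by ring]
      rw [pvGet2_tbl _ 0 (m:Int) (by omega) (by push_cast; omega) (by omega) (by push_cast; omega)]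
      rw [pvSet2_tbl _ 0 ((m:Int)+1) _ (by omega) (by push_cast; omega) (by omega) (by push_cast; omega)]
      simp only [Int.toNat_zero, show ((m:Int)+1).toNat = m+1 from by omega,
                 Int.toNat_natCast]
      simp only [hm', le_refl, and_true, if_true]
      apply pvTbl_congr
      intro r _ c _
      by_cases hr0 : r = 0
      · subst hr0
        by_cases hc1 : c = m+1
        · subst hc1
          rw [if_pos (by omega), if_pos (by omega)]
          obtain ⟨m', rfl⟩ : ∃ m', m = m'+1 := ⟨m-1, by omega⟩
          simp [pvF]
        · rw [if_neg (by omega)]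
          by_cases hcr : 1 ≤ c ∧ c ≤ m
          · rw [if_pos (by omega), if_pos (by omega)]
          · rw [if_neg (by omega), if_neg (by omega)]
      · rw [if_neg (by omega), if_neg (by omega), if_neg (by omega)]

lemma phase2row (n k1 r : Nat) (hr : 1 ≤ r) (hrk : r ≤ k1) (m : Nat) (hrm : r ≤ m) (hm : m ≤ n) :
    (PySem.List.pyRange ((r:Int)+1) ((m:Int)+1) 1).foldl (pvBody2c (r:Int))
      (pvTbl (k1+1) (n+1)
        (fun r' c => if (r' < r ∧ 1 ≤ c) ∨ (r' = r ∧ 1 ≤ c ∧ c ≤ r) then pvF r' c else (0,0)))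
    = pvTbl (k1+1) (n+1)
        (fun r' c => if (r' < r ∧ 1 ≤ c) ∨ (r' = r ∧ 1 ≤ c ∧ c ≤ m) then pvF r' c else (0,0)) := by
  induction m with
  | zero => omega
  | succ m ih =>
    by_cases hb : m + 1 = r
    · rw [PySem.List.pyRange_one_eq_nil (by push_cast; omega)]
      simp only [List.foldl_nil]
      apply pvTbl_congr
      intro r' _ c _
      by_cases h : (r' < r ∧ 1 ≤ c) ∨ (r' = r ∧ 1 ≤ c ∧ c ≤ r)
      · rw [if_pos h, if_pos (by omega)]
      · rw [if_neg h, if_neg (by omega)]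
    · have hrm' : r ≤ m := by omega
      have h1m : 1 ≤ m := by omega
      rw [show ((m+1 : Nat) : Int) + 1 = ((m:Int)+1) + 1 from by push_cast; ring]
      rw [PySem.List.pyRange_one_succ_right (by omega : (r:Int)+1 ≤ (m:Int)+1)]
      rw [List.foldl_append, ih hrm' (by omega)]
      simp only [List.foldl_cons, List.foldl_nil]
      unfold pvBody2c
      rw [show ((m:Int)+1-1) = (m:Int) from by ring]
      rw [pvGet2_tbl _ (r:Int) (m:Int) (by omega) (by push_cast; omega) (by omega)
            (by push_cast; omega)]
      rw [pvGet2_tbl _ ((r:Int)-1) (m:Int) (by omega) (by push_cast; omega) (by omega)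
            (by push_cast; omega)]
      rw [pvSet2_tbl _ (r:Int) ((m:Int)+1) _ (by omega) (by push_cast; omega) (by omega)
            (by push_cast; omega)]
      simp only [Int.toNat_natCast, show ((m:Int)+1).toNat = m+1 from by omega,
                 show ((r:Int)-1).toNat = r-1 from by omega]
      have hc1 : ((r-1 < r ∧ 1 ≤ m) ∨ (r-1 = r ∧ 1 ≤ m ∧ m ≤ m)) = True := eq_true (by omega)
      have hc2 : ((r < r ∧ 1 ≤ m) ∨ (True ∧ 1 ≤ m ∧ m ≤ m)) = True := eq_true (by simp; omega)
      simp only [hc2, hc1, if_true]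
      apply pvTbl_congr
      intro r' _ c _
      by_cases hcell : r' = r ∧ c = m + 1
      · obtain ⟨e1, e2⟩ := hcell; subst e1; subst e2
        rw [if_pos (by omega), if_pos (by omega)]
        obtain ⟨m', rfl⟩ : ∃ m', m = m'+1 := ⟨m-1, by omega⟩
        obtain ⟨r'', rfl⟩ : ∃ r'', r' = r''+1 := ⟨r'-1, by omega⟩
        simp [pvF]
      · rw [if_neg hcell]
        by_cases h : (r' < r ∧ 1 ≤ c) ∨ (r' = r ∧ 1 ≤ c ∧ c ≤ m)
        · rw [if_pos h, if_pos (by omega)]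
        · rw [if_neg h, if_neg (by omega)]

lemma phase2 (n k1 : Nat) (_hn : 1 ≤ n) (R : Nat) (hR : R ≤ k1) :
    (PySem.List.pyRange 1 ((R:Int)+1) 1).foldl (pvBodyRow (n:Int))
      (pvTbl (k1+1) (n+1) (fun r c => if r = 0 ∧ 1 ≤ c ∧ c ≤ n then pvF 0 c else (0,0)))
    = pvTbl (k1+1) (n+1) (fun r c => if r ≤ R ∧ 1 ≤ c ∧ c ≤ n then pvF r c else (0,0)) := by
  induction R with
  | zero =>
    rw [PySem.List.pyRange_one_eq_nil (by norm_num)]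
    simp only [List.foldl_nil]
    apply pvTbl_congr
    intro r _ c _
    by_cases h : r = 0
    · subst h; exact if_congr (by omega) rfl rfl
    · rw [if_neg (by omega), if_neg (by omega)]
  | succ R ih =>
    rw [show ((R+1 : Nat) : Int) + 1 = ((R:Int)+1) + 1 from by push_cast; ring]
    rw [PySem.List.pyRange_one_succ_right (by omega : (1:Int) ≤ (R:Int)+1)]
    rw [List.foldl_append, ih (by omega)]
    simp only [List.foldl_cons, List.foldl_nil]
    unfold pvBodyRow
    have hbase :
        pvTbl (k1+1) (n+1) (fun r c => if r ≤ R ∧ 1 ≤ c ∧ c ≤ n then pvF r c else (0,0))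
        = pvTbl (k1+1) (n+1)
            (fun r' c => if (r' < R+1 ∧ 1 ≤ c) ∨ (r' = R+1 ∧ 1 ≤ c ∧ c ≤ R+1)
                         then pvF r' c else (0,0)) := by
      apply pvTbl_congr
      intro r' _ c hc'
      by_cases h : r' ≤ R ∧ 1 ≤ c ∧ c ≤ n
      · rw [if_pos h, if_pos (by omega)]
      · rw [if_neg h]
        by_cases h2 : r' = R+1 ∧ 1 ≤ c ∧ c ≤ R+1
        · rw [if_pos (by omega), pvF_zero r' c (by omega)]
        · rw [if_neg (by omega)]
    rw [hbase]
    by_cases hnR : R + 1 ≤ n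
    · have hrow := phase2row n k1 (R+1) (by omega) (by omega) n (by omega) (le_refl n)
      push_cast at hrow
      rw [hrow]
      apply pvTbl_congr
      intro r' _ c hc'
      by_cases h : (r' < R+1 ∧ 1 ≤ c) ∨ (r' = R+1 ∧ 1 ≤ c ∧ c ≤ n)
      · rw [if_pos h, if_pos (by omega)]
      · rw [if_neg h, if_neg (by omega)]
    · rw [PySem.List.pyRange_one_eq_nil (by omega)]
      simp only [List.foldl_nil]
      apply pvTbl_congr
      intro r' _ c hc'
      by_cases h : (r' < R+1 ∧ 1 ≤ c) ∨ (r' = R+1 ∧ 1 ≤ c ∧ c ≤ R+1)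
      · rw [if_pos h, if_pos (by omega)]
      · rw [if_neg h, if_neg (by omega)]

lemma solA (n k1 : Nat) (hn : 1 ≤ n) :
    solution (n:Int) (k1:Int) = (pvF k1 n).1 + (pvF k1 n).2 := by
  show (pvGet2 ((PySem.List.pyRange 1 ((k1:Int)+1) 1).foldl (pvBodyRow (n:Int))
          ((PySem.List.pyRange 2 ((n:Int)+1) 1).foldl pvBody1
            (pvSet2 ((PySem.List.pyRange 0 ((k1:Int)+1) 1).map
              (fun _ => (PySem.List.pyRange 0 ((n:Int)+1) 1).map (fun _ => ((0,0) : Int × Int))))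
              0 1 (1,1)))) (k1:Int) (n:Int)).1 + (pvGet2 ((PySem.List.pyRange 1 ((k1:Int)+1) 1).foldl (pvBodyRow (n:Int))
          ((PySem.List.pyRange 2 ((n:Int)+1) 1).foldl pvBody1
            (pvSet2 ((PySem.List.pyRange 0 ((k1:Int)+1) 1).map
              (fun _ => (PySem.List.pyRange 0 ((n:Int)+1) 1).map (fun _ => ((0,0) : Int × Int))))
              0 1 (1,1)))) (k1:Int) (n:Int)).2 = (pvF k1 n).1 + (pvF k1 n).2
  rw [pvInit]
  rw [pvSet2_tbl _ 0 1 _ (by omega) (by push_cast; omega) (by omega) (by push_cast; omega)]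
  simp only [Int.toNat_zero, Int.toNat_one]
  show (pvGet2 ((PySem.List.pyRange 1 ((k1:Int)+1) 1).foldl (pvBodyRow (n:Int))
          ((PySem.List.pyRange 2 ((n:Int)+1) 1).foldl pvBody1
            (pvTbl (k1+1) (n+1) (fun r c => if r = 0 ∧ c = 1 then (1,1) else (0,0)))))
        (k1:Int) (n:Int)).1 + (pvGet2 ((PySem.List.pyRange 1 ((k1:Int)+1) 1).foldl (pvBodyRow (n:Int))
          ((PySem.List.pyRange 2 ((n:Int)+1) 1).foldl pvBody1
            (pvTbl (k1+1) (n+1) (fun r c => if r = 0 ∧ c = 1 then (1,1) else (0,0)))))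
        (k1:Int) (n:Int)).2 = (pvF k1 n).1 + (pvF k1 n).2
  rw [phase1 n k1 n hn (le_refl n)]
  rw [phase2 n k1 hn k1 (le_refl k1)]
  rw [pvGet2_tbl _ (k1:Int) (n:Int) (by omega) (by push_cast; omega) (by omega)
        (by push_cast; omega)]
  simp only [Int.toNat_natCast]
  rw [if_pos (by omega)]

-- ===== B-side: closed forms =====

-- closed form for the two DP components (truncated Nat subtraction; choose kills the junk)
def faN (j c : Nat) : Nat :=
  (if j = 0 ∧ 1 ≤ c then 1 else 0) +
    ∑ r ∈ Finset.range c, (j+r).choose r * (c-j-r-1).choose (r+1)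

def fbN (j c : Nat) : Nat :=
  ∑ r ∈ Finset.range c, if j + r + 1 ≤ c then (j+r).choose r * (c-j-r-1).choose r else 0

-- the DP equals the closed forms
lemma pvF_eq_closed (c : Nat) : ∀ j, pvF j c = (((faN j c : Nat) : Int), ((fbN j c : Nat) : Int)) := by
  induction c using Nat.twoStepInduction with
  | zero => intro j; simp [pvF, faN, fbN]
  | one =>
    intro j
    by_cases hj : j = 0
    · subst hj; simp [pvF, faN, fbN]
    · simp [pvF, faN, fbN, hj]
  | more c _ ih1 =>
    intro j
    have hI1 : faN j (c+2) = faN j (c+1) + fbN j (c+1) := by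
      unfold faN fbN
      rw [Finset.sum_range_succ]
      have htop : (j+(c+1)).choose (c+1) * ((c+2)-j-(c+1)-1).choose (c+2) = 0 := by
        have : (c+2)-j-(c+1)-1 = 0 := by omega
        rw [this, Nat.choose_zero_succ, Nat.mul_zero]
      rw [htop, Nat.add_zero]
      have hsum : ∑ r ∈ Finset.range (c+1), (j+r).choose r * ((c+2)-j-r-1).choose (r+1)
          = ∑ r ∈ Finset.range (c+1), ((j+r).choose r * ((c+1)-j-r-1).choose (r+1)
              + if j + r + 1 ≤ c+1 then (j+r).choose r * ((c+1)-j-r-1).choose r else 0) := by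
        apply Finset.sum_congr rfl
        intro r _
        by_cases hg : j + r + 1 ≤ c + 1
        · rw [if_pos hg]
          obtain ⟨m, hm⟩ : ∃ m, (c+1)-j-r-1 = m := ⟨_, rfl⟩
          have h1 : (c+2)-j-r-1 = m+1 := by omega
          rw [hm, h1, Nat.choose_succ_succ, Nat.mul_add]
          simp only [Nat.succ_eq_add_one]
          ring
        · rw [if_neg hg]
          have h1 : (c+2)-j-r-1 = 0 := by omega
          have h2 : (c+1)-j-r-1 = 0 := by omega
          rw [h1, h2, Nat.choose_zero_succ]
          ring
      rw [hsum, Finset.sum_add_distrib]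
      have hbr : (if j = 0 ∧ 1 ≤ c+2 then (1:Nat) else 0) = (if j = 0 ∧ 1 ≤ c+1 then 1 else 0) := by
        by_cases hj : j = 0 <;> simp [hj]
      rw [hbr]
      ring
    have hI2 : ∀ j' , j = j' + 1 → fbN j (c+2) = faN j (c+1) + fbN j' (c+1) := by
      intro j' hj
      subst hj
      unfold faN fbN
      have hsplit : ∑ r ∈ Finset.range (c+2),
            (if (j'+1) + r + 1 ≤ c+2 then ((j'+1)+r).choose r * ((c+2)-(j'+1)-r-1).choose r else 0)
          = ∑ r ∈ Finset.range (c+2),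
              ((if j' + r + 1 ≤ c+1 then (j'+r).choose r * ((c+1)-j'-r-1).choose r else 0)
               + (if r = 0 then 0 else ((j'+1)+(r-1)).choose (r-1) * ((c+1)-(j'+1)-(r-1)-1).choose r)) := by
        apply Finset.sum_congr rfl
        intro r _
        match r with
        | 0 =>
          by_cases h : j' + 1 ≤ c + 1
          · rw [if_pos (by omega : (j'+1) + 0 + 1 ≤ c+2), if_pos (by omega : j' + 0 + 1 ≤ c+1),
                if_pos rfl]
            simp
          · rw [if_neg (by omega : ¬ ((j'+1) + 0 + 1 ≤ c+2)), if_neg (by omega : ¬ (j' + 0 + 1 ≤ c+1)),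
                if_pos rfl]
        | (s+1) =>
          rw [if_neg (Nat.succ_ne_zero s)]
          simp only [Nat.add_sub_cancel]
          by_cases hg : j' + s + 2 ≤ c + 1
          · rw [if_pos (by omega : (j'+1) + (s+1) + 1 ≤ c+2), if_pos (by omega : j' + (s+1) + 1 ≤ c+1)]
            have e1 : (j'+1)+(s+1) = ((j'+(s+1))+1) := by omega
            have e2 : (c+2)-(j'+1)-(s+1)-1 = (c+1)-j'-(s+1)-1 := by omega
            have e3 : (c+1)-(j'+1)-s-1 = (c+1)-j'-(s+1)-1 := by omega
            rw [e1, Nat.choose_succ_succ, e2, e3]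
            have e4 : (j'+1)+s = j'+(s+1) := by omega
            rw [e4]
            simp only [Nat.succ_eq_add_one]
            ring
          · rw [if_neg (by omega : ¬ ((j'+1) + (s+1) + 1 ≤ c+2)),
                if_neg (by omega : ¬ (j' + (s+1) + 1 ≤ c+1))]
            have e3 : (c+1)-(j'+1)-s-1 = 0 := by omega
            rw [e3, Nat.choose_zero_succ, Nat.zero_add, Nat.mul_zero]
      rw [hsplit, Finset.sum_add_distrib]
      -- first summand: fbN j' (c+1) padded with a zero top term
      have hA : ∑ r ∈ Finset.range (c+2),
            (if j' + r + 1 ≤ c+1 then (j'+r).choose r * ((c+1)-j'-r-1).choose r else 0)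
          = ∑ r ∈ Finset.range (c+1),
            (if j' + r + 1 ≤ c+1 then (j'+r).choose r * ((c+1)-j'-r-1).choose r else 0) := by
        rw [Finset.sum_range_succ, if_neg (by omega : ¬ (j' + (c+1) + 1 ≤ c+1)), Nat.add_zero]
      -- second summand: shift index down by one → faN sum
      have hB : ∑ r ∈ Finset.range (c+2),
            (if r = 0 then 0 else ((j'+1)+(r-1)).choose (r-1) * ((c+1)-(j'+1)-(r-1)-1).choose r)
          = ∑ r ∈ Finset.range (c+1), ((j'+1)+r).choose r * ((c+1)-(j'+1)-r-1).choose (r+1) := by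
        rw [Finset.sum_range_succ']
        have h0 : (if (0:Nat) = 0 then (0:Nat)
            else ((j'+1)+(0-1)).choose (0-1) * ((c+1)-(j'+1)-(0-1)-1).choose 0) = 0 := rfl
        rw [h0, Nat.add_zero]
        apply Finset.sum_congr rfl
        intro r _
        rw [if_neg (Nat.succ_ne_zero r)]
        simp only [Nat.add_sub_cancel]
      rw [hA, hB]
      rw [if_neg (by omega : ¬ ((j'+1) = 0 ∧ 1 ≤ c+1)), Nat.zero_add]
      ring
    have hI2z : fbN 0 (c+2) = faN 0 (c+1) := by
      unfold faN fbN
      have lhs_eq : ∑ r ∈ Finset.range (c+2),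
            (if 0 + r + 1 ≤ c+2 then (0+r).choose r * ((c+2)-0-r-1).choose r else 0)
          = ∑ r ∈ Finset.range (c+2), ((c+1)-r).choose r := by
        apply Finset.sum_congr rfl
        intro r hr
        have hrlt := Finset.mem_range.mp hr
        rw [if_pos (by omega : 0 + r + 1 ≤ c+2)]
        have e : (c+2)-0-r-1 = (c+1)-r := by omega
        rw [e, Nat.zero_add, Nat.choose_self, Nat.one_mul]
      have rhs_eq : ∑ r ∈ Finset.range (c+1), (0+r).choose r * ((c+1)-0-r-1).choose (r+1)
          = ∑ r ∈ Finset.range (c+1), ((c+1)-(r+1)).choose (r+1) := by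
        apply Finset.sum_congr rfl
        intro r _
        have e : (c+1)-0-r-1 = (c+1)-(r+1) := by omega
        rw [e, Nat.zero_add, Nat.choose_self, Nat.one_mul]
      rw [lhs_eq, rhs_eq, Finset.sum_range_succ']
      rw [if_pos (⟨rfl, by omega⟩ : (0:Nat) = 0 ∧ 1 ≤ c+1)]
      have e0 : ((c+1)-0).choose 0 = 1 := Nat.choose_zero_right _
      rw [e0]
      omega
    rcases j with _ | j'
    · have hdef : pvF 0 (c+2)
          = ((pvF 0 (c+1)).1 + (pvF 0 (c+1)).2, (pvF 0 (c+1)).1 + 0) := rfl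
      rw [hdef, ih1 0, Prod.mk.injEq]
      refine ⟨?_, ?_⟩
      · rw [hI1]; push_cast; ring
      · rw [hI2z]; push_cast; ring
    · have hdef : pvF (j'+1) (c+2)
          = ((pvF (j'+1) (c+1)).1 + (pvF (j'+1) (c+1)).2,
             (pvF (j'+1) (c+1)).1 + (pvF j' (c+1)).2) := rfl
      rw [hdef, ih1 (j'+1), ih1 j', Prod.mk.injEq]
      refine ⟨?_, ?_⟩
      · rw [hI1]; push_cast; ring
      · rw [hI2 j' rfl]; push_cast; ring

-- merge the two closed forms into the single run-sum B computes
lemma total_closed (k n : Nat) (hn : 1 ≤ n) :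
    faN k n + fbN k n =
      (if k = 0 then 1 else 0) +
        ∑ r ∈ Finset.range (n - k), (k+r).choose r * (n-k-r).choose (r+1) := by
  unfold faN fbN
  have hmerge : ∑ r ∈ Finset.range n, (k+r).choose r * (n-k-r-1).choose (r+1)
        + ∑ r ∈ Finset.range n, (if k + r + 1 ≤ n then (k+r).choose r * (n-k-r-1).choose r else 0)
      = ∑ r ∈ Finset.range n, (k+r).choose r * (n-k-r).choose (r+1) := by
    rw [← Finset.sum_add_distrib]
    apply Finset.sum_congr rfl
    intro r _
    by_cases hg : k + r + 1 ≤ n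
    · rw [if_pos hg]
      obtain ⟨m, hm⟩ : ∃ m, n-k-r-1 = m := ⟨_, rfl⟩
      have h1 : n-k-r = m+1 := by omega
      rw [hm, h1, Nat.choose_succ_succ, Nat.mul_add]
      ring
    · rw [if_neg hg]
      have h1 : n-k-r-1 = 0 := by omega
      have h2 : n-k-r = 0 := by omega
      rw [h1, h2, Nat.choose_zero_succ]
      ring
  have htail : ∑ r ∈ Finset.range n, (k+r).choose r * (n-k-r).choose (r+1)
      = ∑ r ∈ Finset.range (n - k), (k+r).choose r * (n-k-r).choose (r+1) := by
    have hsub : Finset.range (n-k) ⊆ Finset.range n := by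
      intro x hx
      have := Finset.mem_range.mp hx
      exact Finset.mem_range.mpr (by omega)
    refine (Finset.sum_subset hsub ?_).symm
    intro r _ hr
    have hge : n - k ≤ r := by
      rcases Nat.lt_or_ge r (n-k) with h | h
      · exact absurd (Finset.mem_range.mpr h) hr
      · exact h
    have hz : n-k-r = 0 := by omega
    rw [hz, Nat.choose_zero_succ, Nat.mul_zero]
  have hbr : (if k = 0 ∧ 1 ≤ n then (1:Nat) else 0) = (if k = 0 then 1 else 0) := by
    by_cases hk : k = 0 <;> simp [hk, hn]
  rw [hbr, add_assoc, hmerge, htail]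

-- evaluate B's fold
lemma pvFdExact (a c d : Int) (hd : 0 < d) (h : a = c * d) :
    PySem.Int.floordiv a d = c := by
  rw [h, PySem.Int.floordiv_eq_ediv_of_pos hd]
  exact Int.mul_ediv_cancel _ (by omega)

lemma loopB (n k : Nat) (hkn : k ≤ n) (base : Int) :
    ∀ m : Nat, m ≤ (n-k+1)/2 →
    (PySem.List.pyRange 1 ((m:Int)+1) 1).foldl (pvBodyB (n:Int) (k:Int))
      (base, 1, (n:Int)-(k:Int))
    = (base + ((∑ r ∈ Finset.range m, (k+r).choose r * (n-k-r).choose (r+1) : Nat) : Int),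
       (((k+m).choose m : Nat) : Int), (((n-k-m).choose (m+1) : Nat) : Int)) := by
  intro m
  induction m with
  | zero =>
    intro _
    rw [PySem.List.pyRange_one_eq_nil (by omega)]
    simp only [List.foldl_nil]
    rw [Prod.mk.injEq, Prod.mk.injEq]
    refine ⟨by simp, by simp, ?_⟩
    rw [Nat.sub_zero, Nat.choose_one_right]
    omega
  | succ m ih =>
    intro hm
    rw [show ((m+1 : Nat) : Int) + 1 = ((m:Int)+1) + 1 from by push_cast; ring]
    rw [PySem.List.pyRange_one_succ_right (by omega : (1:Int) ≤ (m:Int)+1)]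
    rw [List.foldl_append, ih (by omega)]
    simp only [List.foldl_cons, List.foldl_nil]
    have hA : m + 1 ≤ n - k - m := by omega
    have hkmn : k + m ≤ n := by omega
    unfold pvBodyB
    simp only []
    rw [Prod.mk.injEq, Prod.mk.injEq]
    refine ⟨?_, ?_, ?_⟩
    · -- total component
      rw [Finset.sum_range_succ]
      push_cast
      ring
    · -- c1 component
      apply pvFdExact _ _ _ (by omega : (0:Int) < (m:Int)+1)
      have hid := Nat.add_one_mul_choose_eq (k+m) m
      have : (k+m+1) * (k+m).choose m = (k+m+1).choose (m+1) * (m+1) := by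
        simpa [Nat.succ_eq_add_one] using hid
      have hcast : (((k+m).choose m : Nat) : Int) * ((k:Int) + ((m:Int)+1))
          = (((k+m+1).choose (m+1) : Nat) : Int) * ((m:Int)+1) := by
        have := congrArg (fun x : Nat => (x : Int)) this
        push_cast at this ⊢
        linarith [this]
      rw [show k + (m+1) = k+m+1 from by omega]
      exact hcast
    · -- c2 component
      set A : Nat := n - k - m with hAdef
      have hn2 : (n:Int) - (k:Int) - ((m:Int)+1) + 1 = ((A:Nat):Int) := by
        simp only [hAdef]; omega
      rw [hn2]
      apply pvFdExact _ _ _ (by nlinarith [hA] : (0:Int) < ((A:Nat):Int) * (((m:Int)+1)+1))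
      rw [show n - k - (m+1) = A - 1 from by omega, show (m+1)+1 = m+2 from rfl]
      by_cases hAe : A = m + 1
      · have h0 : ((A:Nat):Int) - ((m:Int)+1) = 0 := by rw [hAe]; push_cast; ring
        have hz : (A-1).choose (m+2) = 0 := Nat.choose_eq_zero_of_lt (by omega)
        rw [hz]
        rw [show (((A:Nat):Int) - ((m:Int)+1) - 1) = ((A:Nat):Int) - ((m:Int)+2) from by ring]
        push_cast
        rw [hAe]
        push_cast
        ring
      · have hA2 : m + 2 ≤ A := by omega
        have h1 := Nat.choose_succ_right_eq A (m+1)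
        -- h1 : A.choose (m+2) * (m+2) = A.choose (m+1) * (A - (m+1))
        have h2 := Nat.choose_mul_succ_eq (A-1) (m+2)
        -- h2 : (A-1).choose (m+2) * A = A.choose (m+2) * (A - (m+2))
        have h2' : (A-1).choose (m+2) * A = A.choose (m+2) * (A - (m+2)) := by
          have e : A - 1 + 1 = A := by omega
          simpa [e] using h2
        have e1 : ((A:Nat):Int) - ((m:Int)+1) = ((A - (m+1) : Nat) : Int) := by omega
        have e2 : ((A:Nat):Int) - ((m:Int)+1) - 1 = ((A - (m+2) : Nat) : Int) := by omega
        rw [e2, e1]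
        have := congrArg (fun x : Nat => (x : Int)) h1
        have h1i : ((A.choose (m+2) : Nat) : Int) * ((m:Int)+2)
            = ((A.choose (m+1) : Nat) : Int) * ((A - (m+1) : Nat) : Int) := by
          push_cast at this ⊢
          linarith [this]
        have := congrArg (fun x : Nat => (x : Int)) h2'
        have h2i : (((A-1).choose (m+2) : Nat) : Int) * ((A:Nat):Int)
            = ((A.choose (m+2) : Nat) : Int) * ((A - (m+2) : Nat) : Int) := by
          push_cast at this ⊢
          linarith [this]
        calc ((A.choose (m+1) : Nat) : Int) * ((A - (m+1) : Nat) : Int) * ((A - (m+2) : Nat) : Int)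
            = ((A.choose (m+2) : Nat) : Int) * ((m:Int)+2) * ((A - (m+2) : Nat) : Int) := by
              rw [← h1i]
          _ = (((A-1).choose (m+2) : Nat) : Int) * ((A:Nat):Int) * ((m:Int)+2) := by
              rw [mul_right_comm, h2i]
          _ = (((A-1).choose (m+2) : Nat) : Int) * (((A:Nat):Int) * (((m:Int)+1)+1)) := by
              ring

lemma solB (n k : Nat) :
    solution_alt (n:Int) (k:Int) =
      (if k = 0 then (1:Int) else 0) +
        ((∑ r ∈ Finset.range (n - k), (k+r).choose r * (n-k-r).choose (r+1) : Nat) : Int) := by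
  unfold solution_alt
  have hif : (if (k:Int) = 0 then (1:Int) else 0) = (if k = 0 then (1:Int) else 0) := by
    by_cases hk : k = 0
    · subst hk; simp
    · rw [if_neg (by exact_mod_cast hk), if_neg hk]
  by_cases hkn : k ≤ n
  · have hcast : (n:Int) - (k:Int) + 1 = ((n - k + 1 : Nat) : Int) := by omega
    have hM : PySem.Int.floordiv ((n:Int) - (k:Int) + 1) 2 = (((n-k+1)/2 : Nat) : Int) := by
      rw [hcast]
      exact_mod_cast PySem.Int.floordiv_natCast (n-k+1) 2
    rw [hM, hif, loopB n k hkn _ ((n-k+1)/2) le_rfl]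
    have htail : ∑ r ∈ Finset.range ((n-k+1)/2), (k+r).choose r * (n-k-r).choose (r+1)
        = ∑ r ∈ Finset.range (n - k), (k+r).choose r * (n-k-r).choose (r+1) := by
      have hsub : Finset.range ((n-k+1)/2) ⊆ Finset.range (n-k) := by
        intro x hx
        have := Finset.mem_range.mp hx
        exact Finset.mem_range.mpr (by omega)
      refine Finset.sum_subset (f := fun r => (k+r).choose r * (n-k-r).choose (r+1)) hsub ?_
      intro r hmem hr
      have h1 := Finset.mem_range.mp hmem
      have h2 : (n-k+1)/2 ≤ r := by
        rcases Nat.lt_or_ge r ((n-k+1)/2) with h | h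
        · exact absurd (Finset.mem_range.mpr h) hr
        · exact h
      have hz : (n-k-r).choose (r+1) = 0 := Nat.choose_eq_zero_of_lt (by omega)
      simp only []
      rw [hz, Nat.mul_zero]
    rw [htail]
  · have hempty : PySem.Int.floordiv ((n:Int) - (k:Int) + 1) 2 + 1 ≤ 1 := by
      have hlt : PySem.Int.floordiv ((n:Int) - (k:Int) + 1) 2 < 1 := by
        rw [PySem.Int.floordiv_lt_iff_lt_mul (by omega)]
        omega
      omega
    rw [PySem.List.pyRange_one_eq_nil hempty]
    simp only [List.foldl_nil]
    have h0 : n - k = 0 := by omega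
    rw [h0, hif]
    simp

-- ===== VERDICT (by name: the statement is the Claim_ definition above) =====
theorem solution_spec : Claim_equal_solution := by
  intro N k _ hpre
  obtain ⟨hN, hk⟩ := hpre
  unfold Spec_solution
  rw [show N = ((N.toNat : Nat) : Int) from by omega, show k = ((k.toNat : Nat) : Int) from by omega]
  rw [solA N.toNat k.toNat (by omega), solB N.toNat k.toNat]
  rw [pvF_eq_closed N.toNat k.toNat]
  show ((faN k.toNat N.toNat : Nat) : Int) + ((fbN k.toNat N.toNat : Nat) : Int) = _
  rw [← Nat.cast_add, total_closed k.toNat N.toNat (by omega)]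
  push_cast
  by_cases hk0 : k.toNat = 0 <;> simp [hk0]
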